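-- pv_equiv track=rewrite | github.com/RumbleJack56/TensorTonic-Solutions | random-forest-vote/random-forest-vote.py | random_forest_vote
-- ===== SOURCE A (Python) =====
-- from collections import Counter
--
-- def random_forest_vote(predictions):
--     """
--     Compute the majority vote from multiple tree predictions.
--     """
--     preds = list(map(Counter,zip(*predictions)))
--     ans = []
--     for pred in preds:
--         for i in sorted(pred):
--             if pred[i] == max(pred.values()):
--                 ans.append(i)
--                 break
--     return ans
-- ===== SOURCE B (Python) =====
-- def random_forest_vote(predictions):
--     result = []
--     for col in zip(*predictions):
--         s = sorted(col)
--         cur = best = s[0]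
--         cur_n = best_n = 1
--         for v in s[1:]:
--             if v == cur:
--                 cur_n += 1
--             else:
--                 cur = v
--                 cur_n = 1
--             if cur_n > best_n:
--                 best = v
--                 best_n = cur_n
--         result.append(best)
--     return result
-- ===== Notes on version B (the rewrite author's own statement) =====
-- stated objective: faster
-- what changed: Per column, A builds a Counter and scans its sorted keys recomputing max(pred.values()) for every key; B sorts the column once and does a single run-length scan with a strict-improvement winner, so the smallest label wins ties with no Counter and no repeated max passes.
import Mathlib
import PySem

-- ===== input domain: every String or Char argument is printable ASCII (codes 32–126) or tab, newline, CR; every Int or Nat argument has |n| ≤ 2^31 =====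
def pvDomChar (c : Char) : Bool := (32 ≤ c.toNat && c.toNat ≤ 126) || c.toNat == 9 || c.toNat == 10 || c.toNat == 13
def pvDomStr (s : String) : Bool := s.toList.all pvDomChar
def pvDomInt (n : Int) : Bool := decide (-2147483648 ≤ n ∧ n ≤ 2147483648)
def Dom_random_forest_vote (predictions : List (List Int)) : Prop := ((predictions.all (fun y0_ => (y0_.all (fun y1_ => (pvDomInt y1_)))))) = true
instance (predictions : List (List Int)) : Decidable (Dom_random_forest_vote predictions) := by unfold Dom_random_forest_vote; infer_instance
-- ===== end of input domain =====

-- B replaces A's per-column Counter + sorted-keys scan (with max() recomputed per key) by one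
-- sort of the column and a single run-length scan with a strict-improvement winner (objective: faster).

-- ===== PORT A =====
-- shared helper: zip(*predictions) — truncating transpose; both Pythons start with exactly this
def pyZipAux : List Int → List (List Int) → List (List Int)
  | [], _ => []
  | x :: xs, rs =>
    if rs.any (·.isEmpty) then []
    else (x :: rs.map (·.headI)) :: pyZipAux xs (rs.map (·.tail))

def pyZip : List (List Int) → List (List Int)
  | [] => []
  | r :: rs => pyZipAux r rs

-- the body of A's 'for pred in preds' loop: first sorted key whose count equals max(pred.values())
def voteStepA (ans : List Int) (c : List Int) : List Int :=
  let pred := PySem.Dict.counter c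
  match (PySem.List.sorted pred.keys (fun i => i)).find?
      (fun i => pred.getD i 0 == (PySem.List.max? pred.values (fun v => v)).getD 0) with
  | some i => ans ++ [i]
  | none => ans

def random_forest_vote (predictions : List (List Int)) : List Int :=
  (pyZip predictions).foldl voteStepA []

-- ===== PORT B =====
-- B's inner loop over s[1:]: state (cur, cur_n, best, best_n)
def scanGo : List Int → Int → Int → Int → Int → Int × Int × Int × Int
  | [], cur, curN, best, bestN => (cur, curN, best, bestN)
  | v :: vs, cur, curN, best, bestN =>
    let cur' := if v = cur then cur else v
    let curN' := if v = cur then curN + 1 else 1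
    if curN' > bestN then scanGo vs cur' curN' v curN' else scanGo vs cur' curN' best bestN

-- the body of B's 'for col in zip(*predictions)' loop ([] is unreachable: no column is empty)
def voteStepB (result : List Int) (col : List Int) : List Int :=
  match PySem.List.sorted col (fun x => x) with
  | [] => result
  | h :: t => result ++ [(scanGo t h 1 h 1).2.2.1]

def random_forest_vote_alt (predictions : List (List Int)) : List Int :=
  (pyZip predictions).foldl voteStepB []

-- ===== PRECONDITION & SPEC =====
def Spec_random_forest_vote (predictions : List (List Int)) (out : List Int) : Prop := out = random_forest_vote_alt predictions
instance (predictions : List (List Int)) (out : List Int) : Decidable (Spec_random_forest_vote predictions out) := by unfold Spec_random_forest_vote; infer_instance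

-- ===== CLAIM (what is proved, stated in full; the proofs are below) =====
def Claim_equal_random_forest_vote : Prop := ∀ (predictions : List (List Int)), Dom_random_forest_vote predictions → Spec_random_forest_vote predictions (random_forest_vote predictions)

-- ===== LEMMAS AND PROOFS =====

-- every column produced by pyZip is nonempty
lemma pyZipAux_mem_ne_nil : ∀ (xs : List Int) (rs : List (List Int)) (c : List Int),
    c ∈ pyZipAux xs rs → c ≠ [] := by
  intro xs
  induction xs with
  | nil => intro rs c hc; simp [pyZipAux] at hc
  | cons x xs ih =>
    intro rs c hc
    simp only [pyZipAux] at hc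
    split at hc
    · simp at hc
    · rcases List.mem_cons.mp hc with h | h
      · subst h; simp
      · exact ih _ _ h

lemma pyZip_mem_ne_nil (rows : List (List Int)) (c : List Int) (hc : c ∈ pyZip rows) : c ≠ [] := by
  cases rows with
  | nil => simp [pyZip] at hc
  | cons r rs => exact pyZipAux_mem_ne_nil r rs c hc

-- run lemma: the scan consuming a run of the current value v
lemma scanGo_replicate (k : Nat) : ∀ (rest : List Int) (v j b bn : Int), j ≤ bn →
    scanGo (List.replicate k v ++ rest) v j b bn
      = scanGo rest v (j + k) (if bn < j + k then v else b) (max bn (j + k)) := by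
  induction k with
  | zero =>
    intro rest v j b bn hj
    simp only [List.replicate, List.nil_append, Nat.cast_zero, add_zero]
    rw [if_neg (by omega), max_eq_left hj]
  | succ k ih =>
    intro rest v j b bn hj
    rw [List.replicate_succ, List.cons_append]
    simp only [scanGo, if_true]
    by_cases h : j + 1 > bn
    · rw [if_pos h, ih rest v (j+1) v (j+1) le_rfl]
      have e : (j:Int) + 1 + (k:Int) = j + ((k+1:Nat):Int) := by push_cast; ring
      rw [e, ite_self, if_pos (by push_cast; omega),
        max_eq_right (by push_cast; omega), max_eq_right (by push_cast; omega)]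
    · rw [if_neg h, ih rest v (j+1) b bn (by omega)]
      have : j + 1 + (k : Int) = j + ((k+1 : Nat) : Int) := by push_cast; ring
      rw [this]

lemma mem_flatten_runs {vs : List Int} {k : Int → Nat} {x : Int}
    (hx : x ∈ (vs.map (fun v => List.replicate (k v) v)).flatten) : x ∈ vs := by
  simp only [List.mem_flatten, List.mem_map] at hx
  obtain ⟨l, ⟨v, hv, rfl⟩, hxl⟩ := hx
  rw [List.eq_of_mem_replicate hxl]; exact hv

lemma pairwise_le_flatten_runs {vs : List Int} {k : Int → Nat} (h : vs.Pairwise (· < ·)) :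
    ((vs.map (fun v => List.replicate (k v) v)).flatten).Pairwise (· ≤ ·) := by
  induction vs with
  | nil => simp
  | cons v vs ih =>
    rcases List.pairwise_cons.mp h with ⟨hv, hvs⟩
    simp only [List.map_cons, List.flatten_cons]
    apply List.pairwise_append.mpr
    refine ⟨List.pairwise_replicate.mpr (Or.inr le_rfl), ih hvs, ?_⟩
    intro a ha b hb
    rw [List.eq_of_mem_replicate ha]
    exact (hv b (mem_flatten_runs hb)).le

lemma count_flatten_runs {vs : List Int} {k : Int → Nat} (h : vs.Nodup) (a : Int) :
    List.count a ((vs.map (fun v => List.replicate (k v) v)).flatten)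
      = if a ∈ vs then k a else 0 := by
  induction vs with
  | nil => simp
  | cons v vs ih =>
    rcases List.nodup_cons.mp h with ⟨hv, hvs⟩
    simp only [List.map_cons, List.flatten_cons, List.count_append, ih hvs, List.count_replicate]
    by_cases hav : a = v
    · subst hav
      simp [hv]
    · simp [hav, beq_iff_eq, Ne.symm hav]

-- crux: the scan over the runs of strictly increasing values vs computes the value A's find? returns
lemma scanGo_runs_find (f : Int → Int) :
    ∀ (vs : List Int) (cur cn b bn : Int),
      vs.Pairwise (· < ·) → (∀ v ∈ vs, cur < v) → (∀ v ∈ vs, 1 ≤ f v) →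
      1 ≤ bn → cn ≤ bn → f b = bn →
      (b :: vs).find? (fun v => f v == (vs.map f).foldl max bn)
        = some (scanGo ((vs.map (fun v => List.replicate (f v).toNat v)).flatten) cur cn b bn).2.2.1 := by
  intro vs
  induction vs with
  | nil =>
    intro cur cn b bn _ _ _ _ _ hfb
    simp [scanGo, List.find?, hfb]
  | cons v vs ih =>
    intro cur cn b bn hpw hcur h1 hbn hcn hfb
    rcases List.pairwise_cons.mp hpw with ⟨hv, hvs⟩
    have hfv1 : 1 ≤ f v := h1 v List.mem_cons_self
    -- unfold one scan step on the head of the first run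
    have hrep : (f v).toNat = ((f v).toNat - 1) + 1 := by omega
    simp only [List.map_cons, List.flatten_cons]
    rw [hrep, List.replicate_succ, List.cons_append]
    have hne : v ≠ cur := (hcur v List.mem_cons_self).ne'
    simp only [scanGo, if_neg hne, if_neg (show ¬ (1:Int) > bn by omega)]
    rw [scanGo_replicate ((f v).toNat - 1) _ v 1 b bn hbn]
    have hj : (1:Int) + (((f v).toNat - 1 : Nat) : Int) = f v := by omega
    rw [hj]
    -- apply IH with the updated best state
    have hIH := ih v (f v) (if bn < f v then v else b) (max bn (f v)) hvs hv
      (fun w hw => h1 w (List.mem_cons_of_mem _ hw)) (le_trans hbn (le_max_left _ _))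
      (le_max_right _ _) ?_
    · have hM : List.foldl max bn (f v :: List.map f vs) = (vs.map f).foldl max (max bn (f v)) := rfl
      rw [hM]
      set M := (vs.map f).foldl max (max bn (f v)) with hMdef
      have hle := PySem.List.le_foldl_max (vs.map f) (max bn (f v))
      by_cases hcase : bn < f v
      · rw [if_pos hcase] at hIH ⊢
        rw [← hIH]
        have hbne : ¬ ((fun w => f w == M) b) = true := by
          simp only [beq_iff_eq]
          have : max bn (f v) ≤ M := hle.1
          omega
        rw [List.find?_cons_of_neg (p := fun w => f w == M) hbne]
      · rw [if_neg hcase] at hIH ⊢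
        have hmax : max bn (f v) = bn := max_eq_left (by omega)
        by_cases hbM : f b = M
        · rw [List.find?_cons_of_pos (p := fun w => f w == M) (by simpa using hbM)] at hIH ⊢
          exact hIH
        · rw [List.find?_cons_of_neg (p := fun w => f w == M) (by simpa using hbM)] at hIH ⊢
          have hvne : ¬ ((fun w => f w == M) v) = true := by
            simp only [beq_iff_eq]
            have h2 : max bn (f v) ≤ M := hle.1
            rw [hmax] at h2
            omega
          rw [List.find?_cons_of_neg (p := fun w => f w == M) hvne]
          exact hIH
    · by_cases hcase : bn < f v
      · rw [if_pos hcase, max_eq_right (by omega)]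
      · rw [if_neg hcase, max_eq_left (by omega)]; exact hfb

-- sorted(col) is the concatenation of the runs of sorted(set(col))
lemma sorted_eq_runs (c : List Int) :
    PySem.List.sorted c (fun x => x)
      = ((PySem.List.sorted (PySem.Set.ofList c) (fun x => x)).map
          (fun v => List.replicate (List.count v c) v)).flatten := by
  have hplt := PySem.List.sorted_ofList_pairwise_lt (κ := Int) c
  have hnd : (PySem.List.sorted (PySem.Set.ofList c) (fun x => x)).Nodup :=
    hplt.imp ne_of_lt
  have hmemS : ∀ a : Int, a ∈ PySem.List.sorted (PySem.Set.ofList c) (fun x => x) ↔ a ∈ c := by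
    intro a
    rw [PySem.List.mem_sorted, PySem.Set.mem_ofList]
  have hcnt : ∀ a : Int,
      List.count a (((PySem.List.sorted (PySem.Set.ofList c) (fun x => x)).map
          (fun v => List.replicate (List.count v c) v)).flatten) = List.count a c := by
    intro a
    rw [count_flatten_runs hnd a]
    by_cases ha : a ∈ PySem.List.sorted (PySem.Set.ofList c) (fun x => x)
    · rw [if_pos ha]
    · rw [if_neg ha]
      exact (List.count_eq_zero.mpr (fun h => ha ((hmemS a).mpr h))).symm
  have hperm : (PySem.List.sorted c (fun x => x)).Perm
      (((PySem.List.sorted (PySem.Set.ofList c) (fun x => x)).map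
          (fun v => List.replicate (List.count v c) v)).flatten) := by
    refine (PySem.List.sorted_perm c (fun x => x) false).trans ?_
    exact List.perm_iff_count.mpr (fun a => (hcnt a).symm)
  refine hperm.eq_of_pairwise (fun a b _ _ hab hba => le_antisymm hab hba) ?_ ?_
  · exact PySem.List.sorted_pairwise c (fun x => x)
  · exact pairwise_le_flatten_runs hplt

-- per-column agreement
lemma step_eq (ans : List Int) (c : List Int) (hc : c ≠ []) :
    voteStepA ans c = voteStepB ans c := by
  -- the sorted distinct values
  obtain ⟨h, vs, hsv⟩ : ∃ h vs, PySem.List.sorted (PySem.Set.ofList c) (fun x => x) = h :: vs := by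
    cases e : PySem.List.sorted (PySem.Set.ofList c) (fun x => x) with
    | nil =>
      rw [PySem.List.sorted_eq_nil_iff] at e
      obtain ⟨a, ha⟩ := List.exists_mem_of_ne_nil c hc
      exact absurd ((PySem.Set.mem_ofList c a).mpr ha) (by simp [e])
    | cons h vs => exact ⟨h, vs, rfl⟩
  set f : Int → Int := fun v => (List.count v c : Int) with hfdef
  have hplt := PySem.List.sorted_ofList_pairwise_lt (κ := Int) c
  rw [hsv] at hplt
  rcases List.pairwise_cons.mp hplt with ⟨hhv, hvs⟩
  have hmemc : ∀ a : Int, a ∈ h :: vs → a ∈ c := by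
    intro a ha
    rw [← hsv, PySem.List.mem_sorted, PySem.Set.mem_ofList] at ha
    exact ha
  have hf1 : ∀ a ∈ h :: vs, 1 ≤ f a := by
    intro a ha
    have := List.count_pos_iff.mpr (hmemc a ha)
    simp only [hfdef]
    omega
  -- A's max(pred.values()) equals the foldl max over the sorted distinct counts
  have hMA : (PySem.List.max? (PySem.Dict.counter c).values (fun v => v)).getD 0
      = (vs.map f).foldl max (f h) := by
    have hvals : (PySem.Dict.counter c).values = (PySem.Set.ofList c).map f := by
      simp only [PySem.Dict.values, PySem.Dict.items_counter, List.map_map]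
      rfl
    have hperm : ((h :: vs).map f).Perm ((PySem.Set.ofList c).map f) := by
      refine List.Perm.map f ?_
      rw [← hsv]
      exact PySem.List.sorted_perm _ _ _
    have hne2 : (PySem.Set.ofList c).map f ≠ [] := by
      intro e
      have := hperm.length_eq
      simp [e] at this
    cases e1 : PySem.List.max? ((PySem.Set.ofList c).map f) (fun v => v) with
    | none => exact absurd ((PySem.List.max?_eq_none_iff _ _).mp e1) hne2
    | some m1 =>
      have e2 : PySem.List.max? ((h :: vs).map f) (fun v => v)
          = some ((vs.map f).foldl max (f h)) := by
        simpa using PySem.List.max?_id_cons (f h) (vs.map f)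
      have h1 : m1 ≤ (vs.map f).foldl max (f h) :=
        PySem.List.max?_isMax e2 m1 (hperm.mem_iff.mpr (PySem.List.max?_mem e1))
      have h2 : (vs.map f).foldl max (f h) ≤ m1 :=
        PySem.List.max?_isMax e1 _ (hperm.mem_iff.mp (PySem.List.max?_mem e2))
      rw [hvals, e1]
      simpa using le_antisymm h1 h2
  -- rewrite A's find? into the crux's form
  have hA : voteStepA ans c
      = match (h :: vs).find? (fun v => f v == (vs.map f).foldl max (f h)) with
        | some i => ans ++ [i]
        | none => ans := by
    unfold voteStepA
    have hpred : (fun i => (PySem.Dict.counter c).getD i 0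
          == (PySem.List.max? (PySem.Dict.counter c).values (fun v => v)).getD 0)
        = (fun v => f v == (vs.map f).foldl max (f h)) := by
      funext a
      rw [PySem.Dict.getD_counter, hMA]
    simp only [PySem.Dict.keys_counter, hsv, hpred]
  -- B's side: decompose sorted c into the head run and the remaining runs
  have hdec : PySem.List.sorted c (fun x => x)
      = h :: (List.replicate (List.count h c - 1) h
          ++ ((vs.map (fun v => List.replicate (f v).toNat v)).flatten)) := by
    rw [sorted_eq_runs c, hsv]
    have hfun : (fun v => List.replicate (List.count v c) v)
        = (fun v : Int => List.replicate (f v).toNat v) := by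
      funext a; simp [hfdef]
    rw [hfun]
    simp only [List.map_cons, List.flatten_cons]
    have hpos := List.count_pos_iff.mpr (hmemc h List.mem_cons_self)
    have hc1 : (f h).toNat = (List.count h c - 1) + 1 := by
      simp only [hfdef, Int.toNat_natCast]
      omega
    rw [hc1, List.replicate_succ, List.cons_append]
  have hB : voteStepB ans c = ans ++ [(scanGo (List.replicate (List.count h c - 1) h
      ++ ((vs.map (fun v => List.replicate (f v).toNat v)).flatten)) h 1 h 1).2.2.1] := by
    unfold voteStepB
    rw [hdec]
  have hj : (1:Int) + ((List.count h c - 1 : Nat) : Int) = f h := by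
    have hpos := List.count_pos_iff.mpr (hmemc h List.mem_cons_self)
    simp only [hfdef]
    omega
  have hcrux := scanGo_runs_find f vs h (f h) h (f h) hvs hhv
    (fun w hw => hf1 w (List.mem_cons_of_mem _ hw)) (hf1 h List.mem_cons_self) le_rfl rfl
  rw [hA, hB, scanGo_replicate _ _ _ 1 h 1 le_rfl, hj, ite_self,
    max_eq_right (hf1 h List.mem_cons_self), hcrux]

lemma foldl_step_eq : ∀ (cols : List (List Int)), (∀ c ∈ cols, c ≠ []) →
    ∀ ans, cols.foldl voteStepA ans = cols.foldl voteStepB ans := by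
  intro cols
  induction cols with
  | nil => intro _ ans; rfl
  | cons c cols ih =>
    intro hne ans
    simp only [List.foldl_cons]
    rw [step_eq ans c (hne c List.mem_cons_self)]
    exact ih (fun d hd => hne d (List.mem_cons_of_mem _ hd)) _

-- ===== VERDICT (by name: the statement is the Claim_ definition above) =====
theorem random_forest_vote_spec : Claim_equal_random_forest_vote := by
  intro p _
  unfold Spec_random_forest_vote random_forest_vote random_forest_vote_alt
  exact foldl_step_eq _ (fun c hc => pyZip_mem_ne_nil p c hc) []
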